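-- pv_equiv track=rewrite | github.com/Wangxinyu-qlz/mastergo2html | scripts/compress_dsl.py | normalize_style_tokens
-- ===== SOURCE A (Python) =====
-- from typing import Any
--
-- def normalize_style_tokens(styles: dict[str, Any]) -> dict[str, Any]:
--     colors: dict[str, Any] = {}
--     fonts: dict[str, Any] = {}
--     others: dict[str, Any] = {}
--     for key, value in styles.items():
--         if key.startswith("paint_"):
--             colors[key] = value
--         elif key.startswith("font_"):
--             fonts[key] = value
--         else:
--             others[key] = value
--     return {
--         "colors": colors,
--         "fonts": fonts,
--         "misc": others,
--     }
-- ===== SOURCE B (Python) =====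
-- _BUCKET_OF_TOKEN = {"paint_": "colors", "font_": "fonts"}
--
--
-- def _bucket(key):
--     # classify a key by its first underscore-delimited token (empty if no "_")
--     return _BUCKET_OF_TOKEN.get(key[: key.find("_") + 1], "misc")
--
--
-- def normalize_style_tokens(styles):
--     tagged = [(_bucket(key), key, value) for key, value in styles.items()]
--     return {name: {k: v for b, k, v in tagged if b == name}
--             for name in ("colors", "fonts", "misc")}
-- ===== Notes on version B (the rewrite author's own statement) =====
-- stated objective: alternative
-- what changed: A's single three-way startswith-branching loop into three accumulator dicts is replaced by a two-stage pipeline: every key is classified once by extracting its first underscore-delimited token and looking it up in a prefix-to-bucket table, then the tagged items are grouped per bucket name.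
import Mathlib
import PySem

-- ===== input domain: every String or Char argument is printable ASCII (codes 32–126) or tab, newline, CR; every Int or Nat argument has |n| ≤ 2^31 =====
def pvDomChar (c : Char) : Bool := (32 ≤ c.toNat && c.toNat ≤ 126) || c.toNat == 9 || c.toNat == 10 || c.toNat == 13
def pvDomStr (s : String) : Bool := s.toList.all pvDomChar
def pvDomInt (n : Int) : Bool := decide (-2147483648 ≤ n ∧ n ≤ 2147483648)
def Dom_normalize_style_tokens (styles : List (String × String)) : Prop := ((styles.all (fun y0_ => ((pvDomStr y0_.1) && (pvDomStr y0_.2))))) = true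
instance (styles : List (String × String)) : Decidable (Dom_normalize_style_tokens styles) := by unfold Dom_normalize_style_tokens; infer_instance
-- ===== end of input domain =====

-- B replaces A's three-way-branching accumulator loop by a two-stage pipeline: each key is
-- classified ONCE by extracting its first underscore-delimited token and looking it up in a
-- prefix→bucket table, then the tagged items are grouped by tag (objective: alternative).

-- ===== PORT A =====
-- The body of A's loop: route (key, value) into one of the three dicts.
def pvStepA (acc : PySem.Dict String String × PySem.Dict String String × PySem.Dict String String)
    (kv : String × String) :
    PySem.Dict String String × PySem.Dict String String × PySem.Dict String String :=
  if PySem.Str.startswith kv.1 "paint_" then (acc.1.insert kv.1 kv.2, acc.2.1, acc.2.2)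
  else if PySem.Str.startswith kv.1 "font_" then (acc.1, acc.2.1.insert kv.1 kv.2, acc.2.2)
  else (acc.1, acc.2.1, acc.2.2.insert kv.1 kv.2)

-- A: one loop over styles.items() accumulating (colors, fonts, others).
def normalize_style_tokens (styles : List (String × String)) : List (String × List (String × String)) :=
  let st := styles.foldl pvStepA (PySem.Dict.empty, PySem.Dict.empty, PySem.Dict.empty)
  [("colors", st.1.items), ("fonts", st.2.1.items), ("misc", st.2.2.items)]

-- ===== PORT B =====
-- _bucket(key): the first underscore-delimited token key[: key.find("_") + 1], looked up
-- in the prefix table _BUCKET_OF_TOKEN = {"paint_": "colors", "font_": "fonts"}.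
def pvBucket (key : String) : String :=
  (PySem.Dict.ofList [("paint_", "colors"), ("font_", "fonts")]).getD
    (PySem.Str.slice key none (some (PySem.Str.find key "_" + 1))) "misc"

-- B: tag every item with its bucket once, then one dict comprehension per bucket name
-- collecting the items carrying that tag.
def normalize_style_tokens_alt (styles : List (String × String)) : List (String × List (String × String)) :=
  let tagged := styles.map (fun kv => (pvBucket kv.1, kv.1, kv.2))
  ["colors", "fonts", "misc"].map (fun name =>
    (name, (tagged.foldl (fun d t => if t.1 == name then d.insert t.2.1 t.2.2 else d)
      (PySem.Dict.empty : PySem.Dict String String)).items))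

-- ===== PRECONDITION & SPEC =====
-- Pre_ excludes association lists with duplicate keys: they do not represent a Python
-- dict (dict keys are unique), so no Python call of A ever sees such an input.
def Pre_normalize_style_tokens (styles : List (String × String)) : Prop :=
  (styles.map Prod.fst).Nodup
instance (styles : List (String × String)) : Decidable (Pre_normalize_style_tokens styles) := by
  unfold Pre_normalize_style_tokens; infer_instance

def pvWitness_normalize_style_tokens : (List (String × String)) :=
  [("paint_a", "1"), ("font_b", "2"), ("c", "3")]

def Spec_normalize_style_tokens (styles : List (String × String)) (out : List (String × List (String × String))) : Prop := out = normalize_style_tokens_alt styles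
instance (styles : List (String × String)) (out : List (String × List (String × String))) : Decidable (Spec_normalize_style_tokens styles out) := by unfold Spec_normalize_style_tokens; infer_instance

-- ===== CLAIM (what is proved, stated in full; the proofs are below) =====
def Claim_equal_normalize_style_tokens : Prop := ∀ (styles : List (String × String)), Dom_normalize_style_tokens styles → Pre_normalize_style_tokens styles → Spec_normalize_style_tokens styles (normalize_style_tokens styles)

-- ===== LEMMAS AND PROOFS =====

-- Unfold the two-entry lookup table of pvBucket.
theorem pvTable_getD (s : String) :
    (PySem.Dict.ofList [("paint_", "colors"), ("font_", "fonts")]).getD s "misc"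
      = (if s == "paint_" then "colors" else if s == "font_" then "fonts" else "misc") := by
  by_cases h1 : s = "paint_"
  · subst h1; decide
  · by_cases h2 : s = "font_"
    · subst h2; decide
    · have e0 : PySem.Dict.ofList [("paint_", "colors"), ("font_", "fonts")]
          = ⟨[("paint_", "colors"), ("font_", "fonts")]⟩ := by decide
      have e1 : ("paint_" == s) = false := by simp [Ne.symm h1]
      have e2 : ("font_" == s) = false := by simp [Ne.symm h2]
      rw [e0]
      simp [PySem.Dict.getD, PySem.Dict.get?, e1, e2, h1, h2]

-- pvBucket computes exactly A's branch: the first "_"-token is "paint_"/"font_"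
-- precisely when the key starts with that prefix.
theorem pvBucket_eq (key : String) :
    pvBucket key = (if PySem.Str.startswith key "paint_" then "colors"
      else if PySem.Str.startswith key "font_" then "fonts" else "misc") := by
  unfold pvBucket
  rw [pvTable_getD]
  have hF : PySem.Str.find key "_" = PySem.Chars.find key.toList ['_'] := by
    simp [PySem.Str.find]
  have hnn : (0 : Int) ≤ PySem.Chars.find key.toList ['_'] + 1 := by
    have := PySem.Chars.neg_one_le_find key.toList ['_']; omega
  have hsl : (PySem.Str.slice key none (some (PySem.Str.find key "_" + 1))).toList
      = key.toList.take (PySem.Chars.find key.toList ['_'] + 1).toNat := by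
    rw [PySem.Str.toList_slice, PySem.Chars.slice_eq_listSlice, hF,
      PySem.List.slice_to _ hnn]
  by_cases hp : PySem.Chars.startswith key.toList ['p','a','i','n','t','_'] = true
  . obtain ⟨t, ht⟩ := (PySem.Chars.startswith_iff _ _).mp hp
    have ht2 : key.toList = 'p'::'a'::'i'::'n'::'t'::'_'::t := by
      rw [← ht]; rfl
    have hf : PySem.Chars.find key.toList ['_'] = 5 := by
      rw [ht2]; simp [PySem.Chars.find, PySem.Chars.find.go]
    have hS : PySem.Str.slice key none (some (PySem.Str.find key "_" + 1)) = "paint_" := by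
      apply String.toList_injective
      rw [hsl, hf, ht2]
      rfl
    have hp2 : PySem.Str.startswith key "paint_" = true := by
      rw [PySem.Str.startswith_eq]; exact hp
    rw [hS]; simp [hp]
  . have hp2 : PySem.Str.startswith key "paint_" = false := by
      rw [PySem.Str.startswith_eq]; simpa using hp
    by_cases hq : PySem.Chars.startswith key.toList ['f','o','n','t','_'] = true
    . obtain ⟨t, ht⟩ := (PySem.Chars.startswith_iff _ _).mp hq
      have ht2 : key.toList = 'f'::'o'::'n'::'t'::'_'::t := by
        rw [← ht]; rfl
      have hf : PySem.Chars.find key.toList ['_'] = 4 := by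
        rw [ht2]; simp [PySem.Chars.find, PySem.Chars.find.go]
      have hS : PySem.Str.slice key none (some (PySem.Str.find key "_" + 1)) = "font_" := by
        apply String.toList_injective
        rw [hsl, hf, ht2]
        rfl
      have hq2 : PySem.Str.startswith key "font_" = true := by
        rw [PySem.Str.startswith_eq]; exact hq
      rw [hS]; simp [hp, hq]
    . have hq2 : PySem.Str.startswith key "font_" = false := by
        rw [PySem.Str.startswith_eq]; simpa using hq
      -- the extracted token is a prefix of the key, so it is neither table entry
      have hpref : (PySem.Str.slice key none (some (PySem.Str.find key "_" + 1))).toList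
          <+: key.toList := by
        rw [hsl]; exact List.take_prefix _ _
      have ne1 : (PySem.Str.slice key none (some (PySem.Str.find key "_" + 1))) ≠ "paint_" := by
        intro h
        rw [h] at hpref
        exact absurd ((PySem.Chars.startswith_iff _ _).mpr hpref) (by simpa using hp)
      have ne2 : (PySem.Str.slice key none (some (PySem.Str.find key "_" + 1))) ≠ "font_" := by
        intro h
        rw [h] at hpref
        exact absurd ((PySem.Chars.startswith_iff _ _).mpr hpref) (by simpa using hq)
      rw [hF] at ne1 ne2
      simp [ne1, ne2, hp, hq]

-- Inserting a list of fresh, mutually distinct keys into a dict appends its items.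
theorem items_foldl_insert (l : List (String × String)) (d : PySem.Dict String String)
    (hn : (l.map Prod.fst).Nodup) (hd : ∀ p ∈ l, d.contains p.1 = false) :
    (l.foldl (fun d kv => d.insert kv.1 kv.2) d).items = d.items ++ l := by
  induction l generalizing d with
  | nil => simp
  | cons kv rest ih =>
    obtain ⟨k, v⟩ := kv
    simp only [List.map_cons, List.nodup_cons] at hn
    have hk : d.contains k = false := hd (k, v) (List.mem_cons_self ..)
    have hd' : ∀ p ∈ rest, (d.insert k v).contains p.1 = false := by
      intro p hp
      rw [PySem.Dict.contains_insert]
      have hne : p.1 ≠ k := fun h => hn.1 (h ▸ List.mem_map_of_mem hp)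
      simp only [Bool.or_eq_false_iff, beq_eq_false_iff_ne]
      exact ⟨hne, hd p (List.mem_cons_of_mem _ hp)⟩
    rw [List.foldl_cons, ih (d.insert k v) hn.2 hd',
      PySem.Dict.items_insert_of_not_contains _ _ hk]
    simp

-- Loop invariant for A: starting from dicts whose keys are disjoint from the (Nodup)
-- keys of the remaining list, A's loop appends each pair to the matching bucket.
theorem normalize_loop_eq (styles : List (String × String))
    (c f o : PySem.Dict String String)
    (hn : (styles.map Prod.fst).Nodup)
    (hc : ∀ p ∈ styles, c.contains p.1 = false)
    (hf : ∀ p ∈ styles, f.contains p.1 = false)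
    (ho : ∀ p ∈ styles, o.contains p.1 = false) :
    (styles.foldl pvStepA (c, f, o)).1.items
      = c.items ++ styles.filter (fun kv => PySem.Str.startswith kv.1 "paint_")
    ∧ (styles.foldl pvStepA (c, f, o)).2.1.items
      = f.items ++ styles.filter (fun kv => !PySem.Str.startswith kv.1 "paint_"
          && PySem.Str.startswith kv.1 "font_")
    ∧ (styles.foldl pvStepA (c, f, o)).2.2.items
      = o.items ++ styles.filter (fun kv =>
          !PySem.Str.startswith kv.1 "paint_" && !PySem.Str.startswith kv.1 "font_") := by
  induction styles generalizing c f o with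
  | nil => simp
  | cons kv rest ih =>
    obtain ⟨k, v⟩ := kv
    simp only [List.map_cons, List.nodup_cons] at hn
    have hck : c.contains k = false := hc (k, v) (List.mem_cons_self ..)
    have hfk : f.contains k = false := hf (k, v) (List.mem_cons_self ..)
    have hok : o.contains k = false := ho (k, v) (List.mem_cons_self ..)
    have hc' : ∀ p ∈ rest, c.contains p.1 = false := fun p hp => hc p (List.mem_cons_of_mem _ hp)
    have hf' : ∀ p ∈ rest, f.contains p.1 = false := fun p hp => hf p (List.mem_cons_of_mem _ hp)
    have ho' : ∀ p ∈ rest, o.contains p.1 = false := fun p hp => ho p (List.mem_cons_of_mem _ hp)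
    have hfresh : ∀ (d : PySem.Dict String String), (∀ p ∈ rest, d.contains p.1 = false) →
        ∀ p ∈ rest, (d.insert k v).contains p.1 = false := by
      intro d hd p hp
      rw [PySem.Dict.contains_insert]
      have hne : p.1 ≠ k := fun h => hn.1 (h ▸ List.mem_map_of_mem hp)
      simp only [Bool.or_eq_false_iff, beq_eq_false_iff_ne]
      exact ⟨hne, hd p hp⟩
    by_cases h1 : PySem.Chars.startswith k.toList ['p','a','i','n','t','_'] = true
    · have hstep : pvStepA (c, f, o) (k, v) = (c.insert k v, f, o) := by
        simp [pvStepA, PySem.Str.startswith, h1]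
      obtain ⟨i1, i2, i3⟩ := ih (c.insert k v) f o hn.2 (hfresh c hc') hf' ho'
      refine ⟨?_, ?_, ?_⟩ <;>
        simp [List.foldl_cons, hstep, i1, i2, i3, List.filter_cons, h1,
          PySem.Dict.items_insert, hck]
    · by_cases h2 : PySem.Chars.startswith k.toList ['f','o','n','t','_'] = true
      · have hstep : pvStepA (c, f, o) (k, v) = (c, f.insert k v, o) := by
          simp [pvStepA, PySem.Str.startswith, h1, h2]
        obtain ⟨i1, i2, i3⟩ := ih c (f.insert k v) o hn.2 hc' (hfresh f hf') ho'
        refine ⟨?_, ?_, ?_⟩ <;>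
          simp [List.foldl_cons, hstep, i1, i2, i3, List.filter_cons, h1, h2,
            PySem.Dict.items_insert, hfk]
      · have hstep : pvStepA (c, f, o) (k, v) = (c, f, o.insert k v) := by
          simp [pvStepA, PySem.Str.startswith, h1, h2]
        obtain ⟨i1, i2, i3⟩ := ih c f (o.insert k v) hn.2 hc' hf' (hfresh o ho')
        refine ⟨?_, ?_, ?_⟩ <;>
          simp [List.foldl_cons, hstep, i1, i2, i3, List.filter_cons, h1, h2,
            PySem.Dict.items_insert, hok]

-- B's bucket for one name, reduced to a filter of the input list.
theorem alt_bucket_eq (styles : List (String × String)) (name : String)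
    (hn : (styles.map Prod.fst).Nodup) :
    ((styles.map (fun kv => (pvBucket kv.1, kv.1, kv.2))).foldl
        (fun d t => if t.1 == name then d.insert t.2.1 t.2.2 else d)
        (PySem.Dict.empty : PySem.Dict String String)).items
      = styles.filter (fun kv => pvBucket kv.1 == name) := by
  rw [PySem.List.foldl_if_eq_foldl_filter, List.filter_map, List.foldl_map]
  have hsub : ((styles.filter (fun kv => pvBucket kv.1 == name)).map Prod.fst).Nodup := by
    exact (List.Sublist.map Prod.fst List.filter_sublist).nodup hn
  have := items_foldl_insert (styles.filter (fun kv => pvBucket kv.1 == name))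
    PySem.Dict.empty hsub (fun p _ => rfl)
  simpa [Function.comp] using this

-- ===== VERDICT (by name: the statement is the Claim_ definition above) =====
theorem normalize_style_tokens_spec : Claim_equal_normalize_style_tokens := by
  intro styles _ hpre
  obtain ⟨h1, h2, h3⟩ := normalize_loop_eq styles PySem.Dict.empty PySem.Dict.empty
    PySem.Dict.empty hpre (fun p _ => rfl) (fun p _ => rfl) (fun p _ => rfl)
  unfold Spec_normalize_style_tokens normalize_style_tokens normalize_style_tokens_alt
  simp only [List.map_cons, List.map_nil, alt_bucket_eq _ _ hpre, h1, h2, h3]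
  simp only [show (PySem.Dict.empty : PySem.Dict String String).items = [] from rfl, List.nil_append]
  have ec : ∀ kv : String × String,
      (pvBucket kv.1 == "colors") = PySem.Str.startswith kv.1 "paint_" := by
    intro kv; rw [pvBucket_eq]; split_ifs <;> simp_all
  have ef : ∀ kv : String × String, (pvBucket kv.1 == "fonts")
      = (!PySem.Str.startswith kv.1 "paint_" && PySem.Str.startswith kv.1 "font_") := by
    intro kv; rw [pvBucket_eq]; split_ifs <;> simp_all
  have em : ∀ kv : String × String, (pvBucket kv.1 == "misc")
      = (!PySem.Str.startswith kv.1 "paint_" && !PySem.Str.startswith kv.1 "font_") := by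
    intro kv; rw [pvBucket_eq]; split_ifs <;> simp_all
  simp [List.filter_congr (fun kv _ => ec kv), List.filter_congr (fun kv _ => ef kv),
    List.filter_congr (fun kv _ => em kv)]
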